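-- pv_equiv track=rewrite | github.com/Perthanakrit/Python2 | KU_CodingLab/Lab14_Review/pro2.py | m_name
-- ===== SOURCE A (Python) =====
-- def m_name(name, vowels):
--     txt = ""
--     found_vowel = 0
--
--     for i in range(len(name)):
--         if (found_vowel >= 1):
--             txt += name[i]
--             continue
--         if name[i] in vowels:
--             found_vowel += 1
--
--     return name if (txt == "") else txt
-- ===== SOURCE B (Python) =====
-- def m_name(name, vowels):
--     idx = next((i for i, c in enumerate(name) if c in vowels), None)
--     if idx is None:
--         return name
--     rest = name[idx + 1:]
--     return name if rest == "" else rest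
-- ===== Notes on version B (the rewrite author's own statement) =====
-- stated objective: simpler
-- what changed: Replaces A's accumulation loop with a counter flag by a find-first-vowel-index pass followed by a single slice name[idx+1:], keeping the whole-name fallback when the tail is empty.
import Mathlib
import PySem

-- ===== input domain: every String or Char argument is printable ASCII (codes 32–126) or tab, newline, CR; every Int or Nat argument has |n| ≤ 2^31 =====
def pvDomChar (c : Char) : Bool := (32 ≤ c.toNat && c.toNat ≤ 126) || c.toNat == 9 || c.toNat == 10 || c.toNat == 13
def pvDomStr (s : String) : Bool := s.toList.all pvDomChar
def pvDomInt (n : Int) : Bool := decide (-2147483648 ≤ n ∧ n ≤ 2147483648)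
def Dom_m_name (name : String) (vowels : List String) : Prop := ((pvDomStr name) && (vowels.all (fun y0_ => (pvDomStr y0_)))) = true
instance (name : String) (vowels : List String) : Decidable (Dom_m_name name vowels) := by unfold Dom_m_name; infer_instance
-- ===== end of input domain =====

-- B replaces A's accumulation loop (flag + char-by-char copy) by find-first-vowel-index then one slice, with the same whole-name fallback on an empty tail; simpler decomposition, same O(n) cost.


-- ===== PORT A =====
-- A's loop over range(len(name)) visits name[0..n-1] in order; ported as a foldl over the
-- character list with state (txt, found_vowel), branches in the source order.
def mStepA (vowels : List String) (st : List Char × Int) (c : Char) : List Char × Int :=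
  if st.2 ≥ 1 then (st.1 ++ [c], st.2)
  else if String.ofList [c] ∈ vowels then (st.1, st.2 + 1)
  else (st.1, st.2)

def m_name (name : String) (vowels : List String) : String :=
  let r := name.toList.foldl (mStepA vowels) ([], 0)
  if r.1 = [] then name else String.ofList r.1

-- ===== PORT B =====
-- find the first index whose (one-char) string is in vowels; name[idx+1:] with idx+1 ≥ 0 is List.drop (idx+1)
def m_name_alt (name : String) (vowels : List String) : String :=
  match name.toList.findIdx? (fun c => decide (String.ofList [c] ∈ vowels)) with
  | none => name
  | some i =>
      let rest := name.toList.drop (i + 1)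
      if rest = [] then name else String.ofList rest

-- ===== PRECONDITION & SPEC =====
def Spec_m_name (name : String) (vowels : List String) (out : String) : Prop := out = m_name_alt name vowels
instance (name : String) (vowels : List String) (out : String) : Decidable (Spec_m_name name vowels out) := by unfold Spec_m_name; infer_instance

-- ===== CLAIM (what is proved, stated in full; the proofs are below) =====
def Claim_equal_m_name : Prop := ∀ (name : String) (vowels : List String), Dom_m_name name vowels → Spec_m_name name vowels (m_name name vowels)

-- ===== LEMMAS AND PROOFS =====

-- once found_vowel = 1, A's loop appends every remaining character
theorem mStepA_found (vowels : List String) (l txt : List Char) :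
    l.foldl (mStepA vowels) (txt, 1) = (txt ++ l, 1) := by
  induction l generalizing txt with
  | nil => simp
  | cons c t ih => simp [List.foldl, mStepA, ih]

-- A's fold from (txt, 0) characterised by findIdx?
theorem mFoldA_char (vowels : List String) (l txt : List Char) :
    l.foldl (mStepA vowels) (txt, 0) =
      match l.findIdx? (fun c => decide (String.ofList [c] ∈ vowels)) with
      | none => (txt, 0)
      | some i => (txt ++ l.drop (i + 1), 1) := by
  induction l generalizing txt with
  | nil => simp
  | cons c t ih =>
    by_cases h : String.ofList [c] ∈ vowels
    · simp [List.foldl, mStepA, h, List.findIdx?_cons, mStepA_found]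
    · simp only [List.foldl, mStepA, h]
      norm_num
      rw [ih]
      simp [List.findIdx?_cons, h]
      cases ht : t.findIdx? (fun c => decide (String.ofList [c] ∈ vowels)) <;> simp

theorem m_name_eq (name : String) (vowels : List String) :
    m_name name vowels = m_name_alt name vowels := by
  unfold m_name m_name_alt
  rw [mFoldA_char]
  cases h : name.toList.findIdx? (fun c => decide (String.ofList [c] ∈ vowels)) <;> simp

-- ===== VERDICT (by name: the statement is the Claim_ definition above) =====
theorem m_name_spec : Claim_equal_m_name := by
  intro name vowels _
  unfold Spec_m_name
  exact m_name_eq name vowels
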